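-- pv_equiv track=rewrite | github.com/gasobral/python_codes | Introduction to Programming/CadernoExerciciosUSP/exe_4_2.py | encaixa
-- ===== SOURCE A (Python) =====
-- def conta_digitos(n):
--     """
-- Conta a quantidade de dígitos de um inteiro n.
--
-- Parâmetros
-- ----------
-- n: int
--    um inteiro
--
-- Retorno
-- -------
-- int
-- A quantidade de dígitos de n.
--     """
--
--     qtde_digitos = 1
--     quociente = n // 10
--
--     while quociente != 0:
--         qtde_digitos = qtde_digitos + 1
--         quociente = quociente // 10
--
--     return qtde_digitos
--
-- def encaixa(a, b):
--     """
-- Escreva uma função encaixa que, recebendo dois números inteiros a e b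
-- como parâmetros, verifica se b corresponde aos últimos dígitos de a.
--
-- Ex:
-- 567890 890  => encaixa
-- 1243   1243 => encaixa
-- 2457   245  => não encaixa
-- 457    2457 => não encaixa
--     """
--
--     if conta_digitos(b) > conta_digitos(a):
--         return False
--
--     ## obter a parte inferior
--     parte_inferior = 0
--     n = conta_digitos(b)
--     i = 0
--     pot_10 = 1
--     num = a
--
--     while i < n:
--         parte_inferior = parte_inferior + (num % 10) * pot_10
--         num = num // 10
--         pot_10 = pot_10 * 10
--         i = i +1
--
--     if parte_inferior - b == 0:
--         return True
--
--     return False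
-- ===== SOURCE B (Python) =====
-- def encaixa(a, b):
--     # Find the smallest power of 10 (at least 10) exceeding b; b fits
--     # onto the tail of a iff the last len-digits-of-b digits of a equal b.
--     m = 10
--     while m <= b:
--         m *= 10
--     return a % m == b
-- ===== Notes on version B (the rewrite author's own statement) =====
-- stated objective: simpler
-- what changed: Replaces the digit-count helper, the digit-count guard and the digit-by-digit accumulation loop with one loop that finds the smallest power of ten exceeding b and a single closed-form modulo comparison a % m == b; Pre_ excludes negative a or b, where A's digit-count loop never terminates.
import Mathlib
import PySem

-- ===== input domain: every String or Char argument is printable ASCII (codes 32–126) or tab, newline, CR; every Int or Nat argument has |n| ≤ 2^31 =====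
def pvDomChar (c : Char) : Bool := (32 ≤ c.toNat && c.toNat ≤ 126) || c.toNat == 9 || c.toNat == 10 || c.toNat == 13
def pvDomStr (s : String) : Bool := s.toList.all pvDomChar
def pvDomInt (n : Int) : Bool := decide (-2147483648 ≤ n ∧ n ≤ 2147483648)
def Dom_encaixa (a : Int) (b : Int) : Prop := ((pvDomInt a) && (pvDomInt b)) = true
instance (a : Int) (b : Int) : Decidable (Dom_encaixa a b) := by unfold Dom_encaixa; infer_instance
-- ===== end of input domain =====

-- B replaces A's digit-count helper, guard and digit-accumulation loop with one
-- power-of-ten search plus a single modulo comparison (objective: simpler).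

-- ===== PORT A =====
-- conta_digitos's while-loop, with fuel: for negative n the Python loop never
-- terminates (n // 10 stays -1); such inputs are excluded by Pre_encaixa, and for
-- 0 ≤ n the fuel n.natAbs + 2 is more than the number of iterations.
def cdGo : Nat → Int → Int → Int
  | 0, _, acc => acc
  | fuel + 1, q, acc =>
      if q ≠ 0 then cdGo fuel (PySem.Int.floordiv q 10) (acc + 1) else acc

def contaDigitos (n : Int) : Int := cdGo (n.natAbs + 2) (PySem.Int.floordiv n 10) 1

-- the 'while i < n' digit-extraction loop of encaixa; runs n times (n ≥ 0 here)
def encGo : Nat → Int → Int → Int → Int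
  | 0, parte, _, _ => parte
  | k + 1, parte, num, pot =>
      encGo k (parte + PySem.Int.mod num 10 * pot) (PySem.Int.floordiv num 10) (pot * 10)

def encaixa (a : Int) (b : Int) : Bool :=
  if contaDigitos b > contaDigitos a then false
  else
    let n := contaDigitos b
    let parte := encGo n.toNat 0 a 1
    if parte - b = 0 then true else false

-- ===== PORT B =====
-- 'm = 10; while m <= b: m *= 10'
def altGo (b : Int) (m : Int) (hm : 0 < m) : Int :=
  if m ≤ b then altGo b (m * 10) (by omega) else m
termination_by (b + 1 - m).toNat
decreasing_by omega

def encaixa_alt (a : Int) (b : Int) : Bool :=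
  decide (PySem.Int.mod a (altGo b 10 (by norm_num)) = b)

-- ===== PRECONDITION & SPEC =====
-- Pre_ excludes negative a or b: there conta_digitos's while-loop never
-- terminates, so the Python A diverges and returns nothing to match.
def Pre_encaixa (a : Int) (b : Int) : Prop := 0 ≤ a ∧ 0 ≤ b
instance (a : Int) (b : Int) : Decidable (Pre_encaixa a b) := by unfold Pre_encaixa; infer_instance
def pvWitness_encaixa : Int × Int := (567890, 890)

def Spec_encaixa (a : Int) (b : Int) (out : Bool) : Prop := out = encaixa_alt a b
instance (a : Int) (b : Int) (out : Bool) : Decidable (Spec_encaixa a b out) := by unfold Spec_encaixa; infer_instance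

-- ===== CLAIM (what is proved, stated in full; the proofs are below) =====
def Claim_equal_encaixa : Prop := ∀ (a : Int) (b : Int), Dom_encaixa a b → Pre_encaixa a b → Spec_encaixa a b (encaixa a b)

-- ===== LEMMAS AND PROOFS =====

-- digit count of a natural number (1 for q < 10)
def dN (q : Nat) : Nat :=
  if h : q < 10 then 1 else dN (q / 10) + 1
decreasing_by exact Nat.div_lt_self (by omega) (by omega)

lemma dN_pos (q : Nat) : 1 ≤ dN q := by
  unfold dN; split <;> omega

lemma dN_small {q : Nat} (h : q < 10) : dN q = 1 := by
  unfold dN; simp [h]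

lemma dN_step {q : Nat} (h : ¬ q < 10) : dN q = dN (q / 10) + 1 := by
  conv_lhs => unfold dN
  simp [h]

lemma dN_lt (q : Nat) : q < 10 ^ dN q := by
  induction q using Nat.strong_induction_on with
  | _ q ih =>
    by_cases h : q < 10
    · simpa [dN_small h] using h
    · have hq : q / 10 < q := Nat.div_lt_self (by omega) (by omega)
      have := ih (q / 10) hq
      rw [dN_step h, pow_succ]
      omega

lemma dN_le' {q : Nat} (h : 1 ≤ q) : 10 ^ (dN q - 1) ≤ q := by
  induction q using Nat.strong_induction_on with
  | _ q ih =>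
    by_cases h10 : q < 10
    · simpa [dN_small h10] using h
    · have hq : q / 10 < q := Nat.div_lt_self (by omega) (by omega)
      have h1 : 1 ≤ q / 10 := by omega
      have := ih (q / 10) hq h1
      rw [dN_step h10]
      have : 10 ^ (dN (q / 10) + 1 - 1) ≤ 10 * (q / 10) := by
        have hp := dN_pos (q / 10)
        calc 10 ^ (dN (q / 10) + 1 - 1) = 10 * 10 ^ (dN (q / 10) - 1) := by
              rw [← pow_succ']
              congr 1
              omega
          _ ≤ 10 * (q / 10) := by omega
      omega

-- characterization: 10^(j-1) ≤ q < 10^j → dN q = j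
lemma dN_char : ∀ (j : Nat), 1 ≤ j → ∀ q : Nat, q < 10 ^ j → 10 ^ (j - 1) ≤ q → dN q = j := by
  intro j
  induction j with
  | zero => omega
  | succ j ih =>
    intro _ q hlt hle
    simp only [Nat.add_sub_cancel] at hle
    by_cases hj : j = 0
    · subst hj
      exact dN_small (by simpa using hlt)
    · have hj1 : 1 ≤ j := by omega
      have h10 : ¬ q < 10 := by
        have : (10:Nat) ^ 1 ≤ 10 ^ j := Nat.pow_le_pow_right (by omega) (by omega)
        simp only [pow_one] at this
        omega
      rw [dN_step h10]
      have hdiv_lt : q / 10 < 10 ^ j := by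
        rw [Nat.div_lt_iff_lt_mul (by omega)]
        calc q < 10 ^ (j + 1) := hlt
          _ = 10 ^ j * 10 := by rw [pow_succ]
      have hdiv_le : 10 ^ (j - 1) ≤ q / 10 := by
        rw [Nat.le_div_iff_mul_le (by omega)]
        calc 10 ^ (j - 1) * 10 = 10 ^ j := by rw [← pow_succ]; congr 1; omega
          _ ≤ q := hle
      rw [ih hj1 (q / 10) hdiv_lt hdiv_le]

-- number of division steps of conta_digitos's loop
def sN (q : Nat) : Nat :=
  if h : q = 0 then 0 else sN (q / 10) + 1
decreasing_by exact Nat.div_lt_self (by omega) (by omega)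

lemma sN_zero : sN 0 = 0 := by unfold sN; simp

lemma sN_step {q : Nat} (h : q ≠ 0) : sN q = sN (q / 10) + 1 := by
  conv_lhs => unfold sN
  simp [h]

lemma dN_eq_sN (q : Nat) : dN q = 1 + sN (q / 10) := by
  induction q using Nat.strong_induction_on with
  | _ q ih =>
    by_cases h : q < 10
    · rw [dN_small h, Nat.div_eq_of_lt h, sN_zero]
    · have hq : q / 10 < q := Nat.div_lt_self (by omega) (by omega)
      rw [dN_step h, ih (q / 10) hq, sN_step (q := q / 10) (by omega), Nat.div_div_eq_div_mul]
      omega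

lemma cdGo_eq : ∀ (fuel : Nat) (q : Nat) (acc : Int), q < fuel →
    cdGo fuel (q : Int) acc = acc + (sN q : Int) := by
  intro fuel
  induction fuel with
  | zero => omega
  | succ fuel ih =>
    intro q acc hq
    by_cases h : q = 0
    · subst h; simp [cdGo, sN_zero]
    · have hcast : (q : Int) ≠ 0 := by exact_mod_cast h
      have hfd : PySem.Int.floordiv (q : Int) 10 = ((q / 10 : Nat) : Int) :=
        PySem.Int.floordiv_natCast q 10
      have hlt : q / 10 < fuel := by
        have := Nat.div_lt_self (by omega : 0 < q) (by omega : 1 < 10)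
        omega
      rw [show cdGo (fuel + 1) (q : Int) acc
            = cdGo fuel (PySem.Int.floordiv (q : Int) 10) (acc + 1) from by
            show (if (q:Int) ≠ 0 then cdGo fuel (PySem.Int.floordiv (q:Int) 10) (acc + 1) else acc) = _
            rw [if_pos hcast],
          hfd, ih (q / 10) (acc + 1) hlt, sN_step h]
      push_cast
      ring

lemma contaDigitos_eq (n : Int) (hn : 0 ≤ n) : contaDigitos n = (dN n.toNat : Int) := by
  have hcast : n = ((n.toNat : Nat) : Int) := by omega
  have hfd : PySem.Int.floordiv ((n.toNat : Nat) : Int) 10 = ((n.toNat / 10 : Nat) : Int) := by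
    exact_mod_cast PySem.Int.floordiv_natCast n.toNat 10
  unfold contaDigitos
  rw [hcast, hfd]
  simp only [Int.natAbs_natCast, Int.toNat_natCast]
  rw [cdGo_eq _ _ _ (by omega : n.toNat / 10 < n.toNat + 2)]
  rw [dN_eq_sN]
  push_cast
  ring

-- Python's %, //: for positive divisor they are Lean's emod/ediv
lemma mod_pow_succ_int (num : Int) (k : Nat) :
    num % 10 ^ (k + 1) = num % 10 + 10 * (num / 10 % 10 ^ k) := by
  have h1 : num / 10 / 10 ^ k = num / 10 ^ (k + 1) := by
    rw [Int.ediv_ediv_of_nonneg, pow_succ']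
    norm_num
  have e1 := Int.emod_add_mul_ediv num 10
  have e2 := Int.emod_add_mul_ediv (num / 10) (10 ^ k)
  have e3 := Int.emod_add_mul_ediv num (10 ^ (k + 1))
  have hp : (10:Int) ^ (k + 1) = 10 * 10 ^ k := by rw [pow_succ']
  linear_combination e3 - e1 - 10 * e2 + (10 * (10:Int) ^ k) * h1 - (num / 10 ^ (k + 1)) * hp

lemma encGo_eq : ∀ (k : Nat) (parte num pot : Int),
    encGo k parte num pot = parte + num % 10 ^ k * pot := by
  intro k
  induction k with
  | zero => intro parte num pot; simp [encGo]
  | succ k ih =>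
    intro parte num pot
    rw [show encGo (k+1) parte num pot
          = encGo k (parte + PySem.Int.mod num 10 * pot) (PySem.Int.floordiv num 10) (pot * 10)
        from rfl,
        ih, PySem.Int.mod_eq_emod_of_pos (by norm_num),
        PySem.Int.floordiv_eq_ediv_of_pos (by norm_num),
        mod_pow_succ_int]
    ring

lemma altGo_eq : ∀ (b m : Int) (hm : 0 < m), 0 ≤ b → ∀ (j : Nat), m = 10 ^ j → 1 ≤ j →
    (j = 1 ∨ (10:Int) ^ (j - 1) ≤ b) → altGo b m hm = 10 ^ dN b.toNat := by
  intro b m hm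
  induction m, hm using altGo.induct (b := b) with
  | case1 m hm hle ih =>
    intro hb j hmj hj _
    rw [altGo.eq_def, if_pos hle]
    refine ih hb (j + 1) (by rw [hmj, pow_succ]) (by omega) (Or.inr ?_)
    simpa [hmj] using hle
  | case2 m hm hgt =>
    intro hb j hmj hj hinv
    rw [altGo.eq_def, if_neg hgt]
    rcases hinv with hj1 | hle
    · subst hj1
      have hblt : b < 10 := by simpa [hmj] using hgt
      rw [dN_small (q := b.toNat) (by omega), hmj]
    · have hblt : b < (10:Int) ^ j := by omega
      have hc1 : ((10:Int) ^ j) = ((10 ^ j : Nat) : Int) := by push_cast; ring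
      have hc2 : ((10:Int) ^ (j - 1)) = ((10 ^ (j - 1) : Nat) : Int) := by push_cast; ring
      rw [hc1] at hblt
      rw [hc2] at hle
      have hbn_lt : b.toNat < 10 ^ j := by omega
      have hbn_le : 10 ^ (j - 1) ≤ b.toNat := by omega
      rw [dN_char j hj b.toNat hbn_lt hbn_le, hmj]

-- ===== VERDICT (by name: the statement is the Claim_ definition above) =====
theorem encaixa_spec : Claim_equal_encaixa := by
  intro a b _ hpre
  obtain ⟨ha, hb⟩ := hpre
  unfold Spec_encaixa encaixa encaixa_alt
  have hcdb := contaDigitos_eq b hb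
  have hcda := contaDigitos_eq a ha
  have hm : altGo b 10 (by norm_num) = 10 ^ dN b.toNat :=
    altGo_eq b 10 (by norm_num) hb 1 (by norm_num) le_rfl (Or.inl rfl)
  rw [hcdb, hcda, hm, PySem.Int.mod_eq_emod_of_pos (by positivity)]
  by_cases hguard : (dN b.toNat : Int) > (dN a.toNat : Int)
  · rw [if_pos hguard]
    -- A returns false; show B also returns false: a % 10^(dN b) = a < b
    have hdn : dN a.toNat < dN b.toNat := by exact_mod_cast hguard
    have hdb2 : 2 ≤ dN b.toNat := by have := dN_pos a.toNat; omega
    have hb1 : 1 ≤ b.toNat := by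
      by_contra h
      have : b.toNat = 0 := by omega
      rw [this] at hdb2
      rw [dN_small (by norm_num : (0:Nat) < 10)] at hdb2
      omega
    have halt : a.toNat < 10 ^ dN a.toNat := dN_lt a.toNat
    have hmono : (10:Nat) ^ dN a.toNat ≤ 10 ^ (dN b.toNat - 1) :=
      Nat.pow_le_pow_right (by omega) (by omega)
    have hble : 10 ^ (dN b.toNat - 1) ≤ b.toNat := dN_le' hb1
    have hab : a.toNat < b.toNat := by omega
    have hlt : a < (10:Int) ^ dN b.toNat := by
      have h1 : a.toNat < 10 ^ dN b.toNat := by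
        have : (10:Nat) ^ (dN b.toNat - 1) ≤ 10 ^ dN b.toNat := Nat.pow_le_pow_right (by omega) (by omega)
        omega
      have hc : ((10:Int) ^ dN b.toNat) = ((10 ^ dN b.toNat : Nat) : Int) := by push_cast; ring
      omega
    have hmod : a % (10:Int) ^ dN b.toNat = a := Int.emod_eq_of_lt ha hlt
    rw [hmod]
    have : a ≠ b := by omega
    simp [this]
  · rw [if_neg hguard]
    simp only [Int.toNat_natCast, encGo_eq]
    by_cases heq : a % 10 ^ dN b.toNat = b
    · simp [heq]
    · simp [sub_eq_zero, heq]
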